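-- pv_equiv track=rewrite | github.com/brk-a/DSA | 0x01_dsa/56-maximum_sum_among_rotations.py | maximum_sum_among_rotations_brute_force
-- ===== SOURCE A (Python) =====
-- def maximum_sum_among_rotations_brute_force(nums: list[int]) -> int:
--     if not isinstance(nums, list) or len(nums) == 0:
--         return -1
--
--     n = len(nums)
--     result = -float('inf')
--
--     for i in range(n):
--         total = 0
--         for j in range(n):
--             idx = (i +  j) % n
--             total += j * nums[idx]
--
--         result = max(result, total)
--
--     return result
-- ===== SOURCE B (Python) =====
-- def maximum_sum_among_rotations_brute_force(nums: list[int]) -> int: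
--     if not isinstance(nums, list) or len(nums) == 0:
--         return -1
--
--     n = len(nums)
--     s = sum(nums)
--     cur = sum(j * v for j, v in enumerate(nums))
--     best = cur
--     for i in range(1, n):
--         cur = cur - s + n * nums[i - 1]
--         if cur > best:
--             best = cur
--     return best
-- ===== Notes on version B (the rewrite author's own statement) =====
-- stated objective: faster
-- what changed: Replaced the O(n^2) recomputation of the weighted sum for every rotation by the O(n) rotation recurrence cur = cur - sum(nums) + n*nums[i-1] applied incrementally with a running maximum.
import Mathlib
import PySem

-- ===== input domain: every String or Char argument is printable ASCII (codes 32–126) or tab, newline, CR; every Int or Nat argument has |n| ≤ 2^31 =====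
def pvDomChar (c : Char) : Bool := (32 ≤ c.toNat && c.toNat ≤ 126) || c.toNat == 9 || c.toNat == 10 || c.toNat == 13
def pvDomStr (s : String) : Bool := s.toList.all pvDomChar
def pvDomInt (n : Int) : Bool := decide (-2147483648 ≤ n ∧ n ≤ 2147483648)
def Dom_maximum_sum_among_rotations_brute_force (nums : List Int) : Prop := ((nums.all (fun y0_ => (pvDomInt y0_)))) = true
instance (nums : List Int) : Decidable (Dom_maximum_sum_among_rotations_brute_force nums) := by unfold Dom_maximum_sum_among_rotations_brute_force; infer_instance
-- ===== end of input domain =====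

-- B replaces A's O(n^2) brute force over all rotations by the O(n) rotation recurrence
-- cur(i) = cur(i-1) - sum(nums) + n*nums[i-1], keeping a running maximum.

-- ===== PORT A =====
-- float('-inf') is modelled as `none`; since the loop runs n ≥ 1 times the accumulator ends
-- `some`, so the `| none => -1` arm of the final match is unreachable on every input.
def maximum_sum_among_rotations_brute_force (nums : List Int) : Int :=
  if nums.length = 0 then -1
  else
    let n : Int := nums.length
    let result : Option Int :=
      (PySem.List.pyRange 0 n 1).foldl
        (fun result i =>
          let total : Int :=
            (PySem.List.pyRange 0 n 1).foldl
              (fun total j =>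
                let idx := PySem.Int.mod (i + j) n  -- (i + j) % n, always in range
                total + j * PySem.List.pyGetD nums idx 0)
              0
          some (match result with
                | none => total          -- max(-inf, total)
                | some r => max r total))
        none
    match result with
    | some r => r
    | none => -1

-- ===== PORT B =====
def maximum_sum_among_rotations_brute_force_alt (nums : List Int) : Int :=
  if nums.length = 0 then -1
  else
    let n : Int := nums.length
    let s : Int := nums.sum
    let cur0 : Int := (PySem.List.enumerate nums 0).foldl (fun a p => a + p.1 * p.2) 0
    let st :=
      (PySem.List.pyRange 1 n 1).foldl
        (fun (st : Int × Int) i =>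
          let cur := st.1 - s + n * PySem.List.pyGetD nums (i - 1) 0  -- nums[i-1], in range
          (cur, if st.2 < cur then cur else st.2))
        (cur0, cur0)
    st.2

-- ===== PRECONDITION & SPEC =====
def Spec_maximum_sum_among_rotations_brute_force (nums : List Int) (out : Int) : Prop := out = maximum_sum_among_rotations_brute_force_alt nums
instance (nums : List Int) (out : Int) : Decidable (Spec_maximum_sum_among_rotations_brute_force nums out) := by unfold Spec_maximum_sum_among_rotations_brute_force; infer_instance

-- ===== CLAIM (what is proved, stated in full; the proofs are below) =====
def Claim_equal_maximum_sum_among_rotations_brute_force : Prop := ∀ (nums : List Int), Dom_maximum_sum_among_rotations_brute_force nums → Spec_maximum_sum_among_rotations_brute_force nums (maximum_sum_among_rotations_brute_force nums)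

-- ===== LEMMAS AND PROOFS =====

-- the weighted sum of rotation i:  T i = Σ_{j<n} j * nums[(i+j) % n]
def pvT (nums : List Int) (i : Nat) : Int :=
  ∑ j ∈ Finset.range nums.length, (j : Int) * nums.getD ((i + j) % nums.length) 0

-- the plain sum over rotation i (shift-invariant)
def pvR (nums : List Int) (i : Nat) : Int :=
  ∑ j ∈ Finset.range nums.length, nums.getD ((i + j) % nums.length) 0

-- running maximum of T 0 .. T k
def pvM (nums : List Int) : Nat → Int
  | 0 => pvT nums 0
  | k + 1 => max (pvM nums k) (pvT nums (k + 1))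

theorem pvSum_getD (l : List Int) : ∑ j ∈ Finset.range l.length, l.getD j 0 = l.sum := by
  induction l with
  | nil => simp
  | cons a t ih =>
      rw [List.length_cons, Finset.sum_range_succ']
      simp only [List.getD_cons_succ, List.getD_cons_zero, ih, List.sum_cons]
      ring

theorem pvListSum (m : Nat) (f : Nat → Int) :
    ((List.range m).map f).sum = ∑ j ∈ Finset.range m, f j := by
  induction m with
  | zero => simp
  | succ k ih => rw [List.range_succ, Finset.sum_range_succ, ← ih]; simp

theorem pvR_succ (nums : List Int) (i : Nat) : pvR nums (i + 1) = pvR nums i := by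
  unfold pvR
  have key : ∀ j ∈ Finset.range nums.length,
      nums.getD ((i + 1 + j) % nums.length) 0
        = nums.getD ((i + (j + 1)) % nums.length) 0 := by
    intro j _
    have : i + 1 + j = i + (j + 1) := by omega
    rw [this]
  rw [Finset.sum_congr rfl key]
  have h1 := Finset.sum_range_succ' (fun k => nums.getD ((i + k) % nums.length) 0) nums.length
  have h2 := Finset.sum_range_succ (fun k => nums.getD ((i + k) % nums.length) 0) nums.length
  simp only at h1 h2
  rw [Nat.add_mod_right] at h2
  have hmod : (i + 0) % nums.length = i % nums.length := by rw [Nat.add_zero]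
  rw [hmod] at h1
  omega

theorem pvR_eq_sum (nums : List Int) (i : Nat) : pvR nums i = nums.sum := by
  induction i with
  | zero =>
      unfold pvR
      rw [← pvSum_getD nums]
      refine Finset.sum_congr rfl ?_
      intro j hj
      rw [Finset.mem_range] at hj
      rw [Nat.zero_add, Nat.mod_eq_of_lt hj]
  | succ k ih => rw [pvR_succ]; exact ih

theorem pvT_succ (nums : List Int) (i : Nat) :
    pvT nums (i + 1)
      = pvT nums i - nums.sum + nums.length * nums.getD (i % nums.length) 0 := by
  have key : ∀ j ∈ Finset.range nums.length,
      (j : Int) * nums.getD ((i + 1 + j) % nums.length) 0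
        = (((j + 1 : Nat) : Int) - 1) * nums.getD ((i + (j + 1)) % nums.length) 0 := by
    intro j _
    have : i + 1 + j = i + (j + 1) := by omega
    rw [this]
    push_cast
    ring
  have h1 := Finset.sum_range_succ' (fun k => ((k : Int) - 1) * nums.getD ((i + k) % nums.length) 0) nums.length
  have h2 := Finset.sum_range_succ (fun k => ((k : Int) - 1) * nums.getD ((i + k) % nums.length) 0) nums.length
  simp only at h1 h2
  rw [Nat.add_mod_right] at h2
  have hsplit : ∑ k ∈ Finset.range nums.length,
      ((k : Int) - 1) * nums.getD ((i + k) % nums.length) 0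
        = pvT nums i - pvR nums i := by
    unfold pvT pvR
    rw [← Finset.sum_sub_distrib]
    refine Finset.sum_congr rfl ?_
    intro j _
    ring
  have hR := pvR_eq_sum nums i
  unfold pvT pvR at hsplit hR
  unfold pvT
  rw [Finset.sum_congr rfl key]
  simp only [Nat.add_zero, Nat.cast_zero] at h1
  push_cast at h1 h2 hsplit hR ⊢
  linarith [h1, h2, hsplit, hR]

-- A's inner loop computes pvT
theorem pvInner_eq (nums : List Int) (i : Int) (hi : 0 ≤ i) :
    (PySem.List.pyRange 0 (nums.length : Int) 1).foldl
        (fun total j => total + j * PySem.List.pyGetD nums (PySem.Int.mod (i + j) (nums.length : Int)) 0) 0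
      = pvT nums i.toNat := by
  lift i to Nat using hi with a
  rw [PySem.List.pyRange_one, PySem.List.foldl_add, List.map_map]
  simp only [Int.sub_zero, Int.toNat_natCast, zero_add]
  rw [pvListSum]
  unfold pvT
  refine Finset.sum_congr rfl ?_
  intro j hj
  simp only [Function.comp]
  have h1 : (a : Int) + (j : Int) = ((a + j : Nat) : Int) := by push_cast; ring
  rw [h1, PySem.Int.mod_natCast, PySem.List.pyGetD_natCast]

-- B's enumerate sum
theorem pvEnumFold (l : List Int) (s : Int) (c : Int) :
    (PySem.List.enumerate l s).foldl (fun a p => a + p.1 * p.2) c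
      = c + ∑ j ∈ Finset.range l.length, (s + j) * l.getD j 0 := by
  induction l generalizing s c with
  | nil => simp [PySem.List.enumerate]
  | cons x t ih =>
      rw [PySem.List.enumerate_cons, List.foldl_cons, ih]
      rw [List.length_cons, Finset.sum_range_succ']
      simp only [List.getD_cons_succ, List.getD_cons_zero]
      push_cast
      ring_nf

theorem pvCur0_eq (nums : List Int) :
    (PySem.List.enumerate nums 0).foldl (fun a p => a + p.1 * p.2) 0 = pvT nums 0 := by
  rw [pvEnumFold]
  simp only [zero_add]
  unfold pvT
  refine Finset.sum_congr rfl ?_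
  intro j hj
  rw [Finset.mem_range] at hj
  rw [Nat.zero_add, Nat.mod_eq_of_lt hj]

-- A's outer loop: running optional maximum
theorem pvOuterA (nums : List Int) (m : Nat) (hm : 1 ≤ m) (hmn : m ≤ nums.length) :
    (PySem.List.pyRange 0 (m : Int) 1).foldl
        (fun result i =>
          let total : Int :=
            (PySem.List.pyRange 0 (nums.length : Int) 1).foldl
              (fun total j =>
                let idx := PySem.Int.mod (i + j) (nums.length : Int)
                total + j * PySem.List.pyGetD nums idx 0)
              0
          some (match result with
                | none => total
                | some r => max r total))
        none
      = some (pvM nums (m - 1)) := by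
  induction m with
  | zero => omega
  | succ k ih =>
    rcases Nat.eq_zero_or_pos k with rfl | hk
    · have h01 : ((1 : Nat) : Int) = 0 + 1 := by norm_num
      rw [h01, PySem.List.pyRange_one_succ_right le_rfl, PySem.List.pyRange_one_eq_nil le_rfl]
      simp only [List.nil_append, List.foldl_cons, List.foldl_nil]
      rw [pvInner_eq nums 0 le_rfl]
      rfl
    · have hcast : ((k + 1 : Nat) : Int) = (k : Int) + 1 := by push_cast; ring
      rw [hcast, PySem.List.pyRange_one_succ_right (by positivity), List.foldl_append,
          ih hk (by omega)]
      simp only [List.foldl_cons, List.foldl_nil]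
      rw [pvInner_eq nums (k : Int) (by positivity)]
      simp only [Int.toNat_natCast]
      obtain ⟨j, rfl⟩ : ∃ j, k = j + 1 := ⟨k - 1, by omega⟩
      simp only [Nat.add_sub_cancel]
      rfl

-- B's loop: (current T, running max)
theorem pvOuterB (nums : List Int) (m : Nat) (hm : 1 ≤ m) (hmn : m ≤ nums.length) :
    (PySem.List.pyRange 1 (m : Int) 1).foldl
        (fun (st : Int × Int) i =>
          let cur := st.1 - nums.sum + (nums.length : Int) * PySem.List.pyGetD nums (i - 1) 0
          (cur, if st.2 < cur then cur else st.2))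
        (pvT nums 0, pvT nums 0)
      = (pvT nums (m - 1), pvM nums (m - 1)) := by
  induction m with
  | zero => omega
  | succ k ih =>
    rcases Nat.eq_zero_or_pos k with rfl | hk
    · rw [show ((1 : Nat) : Int) = 1 by norm_num, PySem.List.pyRange_one_eq_nil le_rfl]
      rfl
    · have hcast : ((k + 1 : Nat) : Int) = (k : Int) + 1 := by push_cast; ring
      rw [hcast, PySem.List.pyRange_one_succ_right (by exact_mod_cast hk), List.foldl_append,
          ih hk (by omega)]
      simp only [List.foldl_cons, List.foldl_nil]
      have hidx : (k : Int) - 1 = ((k - 1 : Nat) : Int) := by omega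
      rw [hidx, PySem.List.pyGetD_natCast]
      have hlt : k - 1 < nums.length := by omega
      have hmod : (k - 1) % nums.length = k - 1 := Nat.mod_eq_of_lt hlt
      have hT : pvT nums (k - 1) - nums.sum
            + (nums.length : Int) * nums.getD (k - 1) 0 = pvT nums k := by
        have := pvT_succ nums (k - 1)
        rw [hmod, show k - 1 + 1 = k by omega] at this
        rw [List.getD] at this ⊢
        linarith [this]
      simp only [Nat.add_sub_cancel]
      rw [hT]
      obtain ⟨j, rfl⟩ : ∃ j, k = j + 1 := ⟨k - 1, by omega⟩
      have hmax : (if pvM nums (j + 1 - 1) < pvT nums (j + 1) then pvT nums (j + 1)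
            else pvM nums (j + 1 - 1)) = pvM nums (j + 1) := by
        simp only [Nat.add_sub_cancel]
        show _ = max (pvM nums j) (pvT nums (j + 1))
        split_ifs with h
        · exact (max_eq_right h.le).symm
        · exact (max_eq_left (not_lt.mp h)).symm
      simp only [Nat.add_sub_cancel] at hmax ⊢
      rw [hmax]

-- ===== VERDICT (by name: the statement is the Claim_ definition above) =====
theorem maximum_sum_among_rotations_brute_force_spec : Claim_equal_maximum_sum_among_rotations_brute_force := by
  intro nums _
  unfold Spec_maximum_sum_among_rotations_brute_force
  unfold maximum_sum_among_rotations_brute_force maximum_sum_among_rotations_brute_force_alt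
  by_cases h : nums.length = 0
  · simp [h]
  · simp only [h, if_false]
    have hn : 1 ≤ nums.length := Nat.one_le_iff_ne_zero.mpr h
    rw [pvCur0_eq, pvOuterB nums nums.length hn le_rfl, pvOuterA nums nums.length hn le_rfl]
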